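-- pv_equiv track=rewrite | github.com/sivamurthy30/Health-summizer | app/services/symptom_analyzer.py | _suggest_follow_up_timeline
-- ===== SOURCE A (Python) =====
-- from typing import Dict, Any, List, Optional
--
-- def _suggest_follow_up_timeline(conditions: List[Dict[str, Any]]) -> str:
--     """Suggest appropriate follow-up timeline."""
--     if not conditions:
--         return "Follow up with healthcare provider within 1-2 weeks"
--
--     urgency_levels = [condition.get('urgency', 'Routine') for condition in conditions]
--
--     if 'Emergency' in urgency_levels:
--         return "Seek immediate emergency care"
--     elif 'Urgent' in urgency_levels:
--         return "Schedule appointment within 24-48 hours"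
--     elif 'Semi-urgent' in urgency_levels:
--         return "Schedule appointment within 1 week"
--     else:
--         return "Schedule routine appointment within 2-4 weeks"
-- ===== SOURCE B (Python) =====
-- def _suggest_follow_up_timeline(conditions):
--     """Suggest appropriate follow-up timeline."""
--     if not conditions:
--         return "Follow up with healthcare provider within 1-2 weeks"
--
--     ranks = {'Emergency': 0, 'Urgent': 1, 'Semi-urgent': 2}
--     messages = [
--         "Seek immediate emergency care",
--         "Schedule appointment within 24-48 hours",
--         "Schedule appointment within 1 week",
--         "Schedule routine appointment within 2-4 weeks",
--     ]
--     best = 3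
--     for condition in conditions:
--         best = min(best, ranks.get(condition.get('urgency', 'Routine'), 3))
--     return messages[best]
-- ===== Notes on version B (the rewrite author's own statement) =====
-- stated objective: alternative
-- what changed: Replaces the three separate membership scans over a materialised urgency list with a single fold that keeps the minimum priority rank and indexes a rank-to-message table.
import Mathlib
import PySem

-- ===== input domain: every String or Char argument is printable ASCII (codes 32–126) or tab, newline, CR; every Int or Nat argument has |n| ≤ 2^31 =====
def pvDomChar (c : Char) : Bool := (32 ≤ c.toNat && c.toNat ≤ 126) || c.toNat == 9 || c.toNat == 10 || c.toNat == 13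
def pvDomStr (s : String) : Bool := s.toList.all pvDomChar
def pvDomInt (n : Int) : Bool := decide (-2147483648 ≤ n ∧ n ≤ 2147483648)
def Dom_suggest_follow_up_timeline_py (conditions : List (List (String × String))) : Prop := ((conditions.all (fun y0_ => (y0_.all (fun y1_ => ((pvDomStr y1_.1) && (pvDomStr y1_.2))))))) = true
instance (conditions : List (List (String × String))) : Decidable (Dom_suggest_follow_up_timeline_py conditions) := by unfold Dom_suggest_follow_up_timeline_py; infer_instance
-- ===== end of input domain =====

-- B replaces A's urgency list plus three membership scans by one min-rank fold over a table (alternative decomposition, same cost).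

-- condition.get('urgency', 'Routine') on an association-list dict: first match, else default (exact Python dict.get)
def pvGetUrgency (c : List (String × String)) : String :=
  match c.find? (fun p => p.1 == "urgency") with
  | some p => p.2
  | none => "Routine"

-- ===== PORT A =====
def suggest_follow_up_timeline_py (conditions : List (List (String × String))) : String :=
  if conditions = [] then "Follow up with healthcare provider within 1-2 weeks"
  else
    let urgency_levels := conditions.map (fun c => pvGetUrgency c)
    if urgency_levels.contains "Emergency" then "Seek immediate emergency care"
    else if urgency_levels.contains "Urgent" then "Schedule appointment within 24-48 hours"
    else if urgency_levels.contains "Semi-urgent" then "Schedule appointment within 1 week"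
    else "Schedule routine appointment within 2-4 weeks"

-- ===== PORT B =====
-- ranks.get(u, 3)
def pvRankOf (u : String) : Nat :=
  if u = "Emergency" then 0
  else if u = "Urgent" then 1
  else if u = "Semi-urgent" then 2
  else 3

def pvMessages : List String :=
  [ "Seek immediate emergency care"
  , "Schedule appointment within 24-48 hours"
  , "Schedule appointment within 1 week"
  , "Schedule routine appointment within 2-4 weeks" ]

def suggest_follow_up_timeline_py_alt (conditions : List (List (String × String))) : String :=
  if conditions = [] then "Follow up with healthcare provider within 1-2 weeks"
  else
    let best := conditions.foldl (fun b c => min b (pvRankOf (pvGetUrgency c))) 3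
    pvMessages.getD best ""   -- messages[best]; best ≤ 3 always, so never out of range

-- ===== PRECONDITION & SPEC =====
def Spec_suggest_follow_up_timeline_py (conditions : List (List (String × String))) (out : String) : Prop := out = suggest_follow_up_timeline_py_alt conditions
instance (conditions : List (List (String × String))) (out : String) : Decidable (Spec_suggest_follow_up_timeline_py conditions out) := by unfold Spec_suggest_follow_up_timeline_py; infer_instance

-- ===== CLAIM (what is proved, stated in full; the proofs are below) =====
def Claim_equal_suggest_follow_up_timeline_py : Prop := ∀ (conditions : List (List (String × String))), Dom_suggest_follow_up_timeline_py conditions → Spec_suggest_follow_up_timeline_py conditions (suggest_follow_up_timeline_py conditions)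

-- ===== LEMMAS AND PROOFS =====

-- pvM l = the minimum rank over l (recursive form of B's fold)
def pvM : List (List (String × String)) → Nat
  | [] => 3
  | c :: l => min (pvRankOf (pvGetUrgency c)) (pvM l)

lemma fold_eq (l : List (List (String × String))) (acc : Nat) (hacc : acc ≤ 3) :
    l.foldl (fun b c => min b (pvRankOf (pvGetUrgency c))) acc = min acc (pvM l) := by
  induction l generalizing acc with
  | nil => simp [pvM, Nat.min_eq_left hacc]
  | cons c l ih =>
    simp only [List.foldl_cons, pvM]
    rw [ih _ (le_trans (Nat.min_le_left _ _) hacc)]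
    omega

lemma M_E (l : List (List (String × String)))
    (h : (l.map (fun c => pvGetUrgency c)).contains "Emergency" = true) : pvM l = 0 := by
  induction l with
  | nil => simp at h
  | cons c l ih =>
    simp only [List.map_cons, List.contains_cons, Bool.or_eq_true, beq_iff_eq] at h
    rcases h with h | h
    · simp [pvM, pvRankOf, h.symm]
    · simp only [pvM, ih h]; omega

lemma LB_E (l : List (List (String × String)))
    (h : ¬ (l.map (fun c => pvGetUrgency c)).contains "Emergency" = true) : 1 ≤ pvM l := by
  induction l with
  | nil => simp [pvM]
  | cons c l ih =>
    simp only [List.map_cons, List.contains_cons, Bool.or_eq_true, beq_iff_eq, not_or] at h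
    have h1 : 1 ≤ pvRankOf (pvGetUrgency c) := by
      unfold pvRankOf; split_ifs with he <;> [exact absurd he.symm h.1; omega; omega; omega]
    have h2 := ih h.2
    simp only [pvM]; omega

lemma M_U (l : List (List (String × String)))
    (hne : ¬ (l.map (fun c => pvGetUrgency c)).contains "Emergency" = true)
    (h : (l.map (fun c => pvGetUrgency c)).contains "Urgent" = true) : pvM l = 1 := by
  induction l with
  | nil => simp at h
  | cons c l ih =>
    simp only [List.map_cons, List.contains_cons, Bool.or_eq_true, beq_iff_eq, not_or] at h hne
    rcases h with h | h
    · have := LB_E l hne.2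
      simp only [pvM, pvRankOf, ← h]
      simp; omega
    · have hr : 1 ≤ pvRankOf (pvGetUrgency c) := by
        unfold pvRankOf; split_ifs with he <;> [exact absurd he.symm hne.1; omega; omega; omega]
      simp only [pvM, ih hne.2 h]; omega

lemma LB_U (l : List (List (String × String)))
    (hE : ¬ (l.map (fun c => pvGetUrgency c)).contains "Emergency" = true)
    (hU : ¬ (l.map (fun c => pvGetUrgency c)).contains "Urgent" = true) : 2 ≤ pvM l := by
  induction l with
  | nil => simp [pvM]
  | cons c l ih =>
    simp only [List.map_cons, List.contains_cons, Bool.or_eq_true, beq_iff_eq, not_or] at hE hU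
    have h1 : 2 ≤ pvRankOf (pvGetUrgency c) := by
      unfold pvRankOf
      split_ifs with he hu <;>
        [exact absurd he.symm hE.1; exact absurd hu.symm hU.1; omega; omega]
    have h2 := ih hE.2 hU.2
    simp only [pvM]; omega

lemma M_S (l : List (List (String × String)))
    (hE : ¬ (l.map (fun c => pvGetUrgency c)).contains "Emergency" = true)
    (hU : ¬ (l.map (fun c => pvGetUrgency c)).contains "Urgent" = true)
    (h : (l.map (fun c => pvGetUrgency c)).contains "Semi-urgent" = true) : pvM l = 2 := by
  induction l with
  | nil => simp at h
  | cons c l ih =>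
    simp only [List.map_cons, List.contains_cons, Bool.or_eq_true, beq_iff_eq, not_or] at h hE hU
    rcases h with h | h
    · have := LB_U l hE.2 hU.2
      simp only [pvM, pvRankOf, ← h]
      simp; omega
    · have hr : 2 ≤ pvRankOf (pvGetUrgency c) := by
        unfold pvRankOf
        split_ifs with he hu <;>
          [exact absurd he.symm hE.1; exact absurd hu.symm hU.1; omega; omega]
      simp only [pvM, ih hE.2 hU.2 h]; omega

lemma M_R (l : List (List (String × String)))
    (hE : ¬ (l.map (fun c => pvGetUrgency c)).contains "Emergency" = true)
    (hU : ¬ (l.map (fun c => pvGetUrgency c)).contains "Urgent" = true)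
    (hS : ¬ (l.map (fun c => pvGetUrgency c)).contains "Semi-urgent" = true) : pvM l = 3 := by
  induction l with
  | nil => simp [pvM]
  | cons c l ih =>
    simp only [List.map_cons, List.contains_cons, Bool.or_eq_true, beq_iff_eq, not_or] at hE hU hS
    have hr : pvRankOf (pvGetUrgency c) = 3 := by
      unfold pvRankOf
      split_ifs with he hu hs <;>
        [exact absurd he.symm hE.1; exact absurd hu.symm hU.1; exact absurd hs.symm hS.1; rfl]
    have := ih hE.2 hU.2 hS.2
    simp only [pvM, hr, this]; omega

theorem suggest_follow_up_timeline_py_spec : Claim_equal_suggest_follow_up_timeline_py := by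
  intro conditions _
  unfold Spec_suggest_follow_up_timeline_py suggest_follow_up_timeline_py suggest_follow_up_timeline_py_alt
  by_cases h : conditions = []
  · simp [h]
  · simp only [h, if_false]
    rw [fold_eq conditions 3 (le_refl 3)]
    split_ifs with hE hU hS
    · simp [M_E conditions hE, pvMessages]
    · simp [M_U conditions hE hU, pvMessages]
    · simp [M_S conditions hE hU hS, pvMessages]
    · simp [M_R conditions hE hU hS, pvMessages]
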